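-- pv_equiv track=rewrite | github.com/blldd/CodeExercise | LeetCode_b/2019offer/pdd/test.py | cut_words
-- ===== SOURCE A (Python) =====
-- def cut_words(text, tags):
--     lxt = len(text)
--     ltg = len(tags)
--     if lxt < 1 or ltg < 1 or lxt != ltg or tags[0] != 'B':
--         return []
--
--     res = []
--     tmp = ""
--     for i, ch in enumerate(tags):
--         if ch == 'B':
--             if tmp != "":
--                 res.append(tmp)
--
--             tmp = ""
--             tmp += text[i]
--
--         elif ch == 'I':
--             tmp += text[i]
--
--     if tmp:
--         res.append(tmp)
--     return res
-- ===== SOURCE B (Python) =====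
-- def cut_words(text, tags):
--     n = len(text)
--     if n < 1 or len(tags) < 1 or len(tags) != n or tags[0] != 'B':
--         return []
--     words = []
--     start = 0
--     while start < n:
--         end = start + 1
--         while end < n and tags[end] != 'B':
--             end += 1
--         words.append(text[start] + ''.join(text[j] for j in range(start + 1, end) if tags[j] == 'I'))
--         start = end
--     return words
-- ===== Notes on version B (the rewrite author's own statement) =====
-- stated objective: alternative
-- what changed: B computes each word span-by-span: it scans forward to the next 'B' boundary and builds the word by filtering that span's indices for B/I tags, instead of A's single pass with an incremental tmp buffer flushed at each 'B' and at the end.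
import Mathlib
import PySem

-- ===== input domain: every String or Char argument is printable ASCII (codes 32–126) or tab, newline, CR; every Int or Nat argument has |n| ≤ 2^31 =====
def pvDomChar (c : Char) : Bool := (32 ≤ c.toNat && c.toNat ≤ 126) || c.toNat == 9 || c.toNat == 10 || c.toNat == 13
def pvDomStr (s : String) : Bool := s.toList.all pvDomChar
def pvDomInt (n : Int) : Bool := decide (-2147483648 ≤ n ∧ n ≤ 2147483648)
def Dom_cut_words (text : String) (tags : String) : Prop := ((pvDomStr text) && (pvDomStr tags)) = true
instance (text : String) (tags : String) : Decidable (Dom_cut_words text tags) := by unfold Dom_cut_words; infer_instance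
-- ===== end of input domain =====

-- B rebuilds the words span-by-span (find each 'B'-to-'B' boundary, then filter that span)
-- instead of A's incremental tmp-buffer-and-flush pass; alternative decomposition, same cost.

-- ===== PORT A =====
-- A's for-loop over enumerate(tags) with state (res, tmp); words kept as List Char and
-- turned into String at the very end.  text[i] is ported as (pyGet? xs i).getD ' ':
-- under A's guard the lengths are equal, so the index is always in range and the
-- default is never used (Python never raises here).
def pvLoopA (xs : List Char) : List (Int × Char) → List (List Char) → List Char →
    List (List Char) × List Char
  | [], res, tmp => (res, tmp)
  | (i, ch) :: rest, res, tmp =>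
    if ch = 'B' then
      pvLoopA xs rest (if tmp ≠ [] then res ++ [tmp] else res)
        [(PySem.List.pyGet? xs i).getD ' ']
    else if ch = 'I' then
      pvLoopA xs rest res (tmp ++ [(PySem.List.pyGet? xs i).getD ' '])
    else
      pvLoopA xs rest res tmp

def cut_words (text : String) (tags : String) : List String :=
  let lxt := PySem.Str.len text
  let ltg := PySem.Str.len tags
  if lxt < 1 ∨ ltg < 1 ∨ lxt ≠ ltg ∨ PySem.Str.pyGet? tags 0 ≠ some 'B' then []
  else
    let p := pvLoopA text.toList (PySem.List.enumerate tags.toList 0) [] []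
    (if p.2 ≠ [] then p.1 ++ [p.2] else p.1).map String.ofList

-- ===== PORT B =====
-- Source B's inner while: advance `e` until e = n or tags[e] == 'B'.  Indices are the
-- nonnegative Python ints of Source B, kept as Nat; tags[e] with e < n is in range, so
-- List.getD is exact there.
def pvSpanEnd (ts : List Char) (n : Nat) (e : Nat) : Nat :=
  if e < n ∧ ts.getD e ' ' ≠ 'B' then pvSpanEnd ts n (e + 1) else e
termination_by n - e
decreasing_by omega

theorem pvSpanEnd_ge (ts : List Char) (n e : Nat) : e ≤ pvSpanEnd ts n e := by
  rw [pvSpanEnd]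
  split
  · have := pvSpanEnd_ge ts n (e + 1); omega
  · exact le_refl e
termination_by n - e
decreasing_by omega

-- one word of Source B: text[start] + ''.join(text[j] for j in range(start+1, end) if tags[j] == 'I')
def pvWordB (xs ts : List Char) (start e : Nat) : List Char :=
  xs.getD start ' ' ::
    ((List.range' (start + 1) (e - (start + 1))).filter
      (fun j => ts.getD j ' ' = 'I')).map (fun j => xs.getD j ' ')

-- Source B's outer while over `start`
def pvLoopB (xs ts : List Char) (n : Nat) (start : Nat) : List (List Char) :=
  if start < n then
    pvWordB xs ts start (pvSpanEnd ts n (start + 1)) ::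
      pvLoopB xs ts n (pvSpanEnd ts n (start + 1))
  else []
termination_by n - start
decreasing_by
  have := pvSpanEnd_ge ts n (start + 1)
  omega

def cut_words_alt (text : String) (tags : String) : List String :=
  let n := PySem.Str.len text
  if n < 1 ∨ PySem.Str.len tags < 1 ∨ PySem.Str.len tags ≠ n ∨
      PySem.Str.pyGet? tags 0 ≠ some 'B' then []
  else (pvLoopB text.toList tags.toList text.toList.length 0).map String.ofList

-- ===== PRECONDITION & SPEC =====
def Spec_cut_words (text : String) (tags : String) (out : List String) : Prop := out = cut_words_alt text tags
instance (text : String) (tags : String) (out : List String) : Decidable (Spec_cut_words text tags out) := by unfold Spec_cut_words; infer_instance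

-- ===== CLAIM (what is proved, stated in full; the proofs are below) =====
def Claim_equal_cut_words : Prop := ∀ (text : String) (tags : String), Dom_cut_words text tags → Spec_cut_words text tags (cut_words text tags)

-- ===== LEMMAS AND PROOFS =====
theorem pvSpanEnd_le (ts : List Char) (n e : Nat) (he : e ≤ n) : pvSpanEnd ts n e ≤ n := by
  rw [pvSpanEnd]
  split
  · exact pvSpanEnd_le ts n (e + 1) (by omega)
  · exact he
termination_by n - e
decreasing_by omega

theorem pvSpanEnd_nonB (ts : List Char) (n e : Nat) :
    ∀ j, e ≤ j → j < pvSpanEnd ts n e → ts.getD j ' ' ≠ 'B' := by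
  rw [pvSpanEnd]
  split
  · rename_i h
    intro j hj1 hj2
    rcases Nat.eq_or_lt_of_le hj1 with rfl | hlt
    · exact h.2
    · exact pvSpanEnd_nonB ts n (e + 1) j hlt hj2
  · intro j hj1 hj2; omega
termination_by n - e
decreasing_by omega

theorem pvSpanEnd_stop (ts : List Char) (n e : Nat) (he : e ≤ n) :
    pvSpanEnd ts n e = n ∨
      (pvSpanEnd ts n e < n ∧ ts.getD (pvSpanEnd ts n e) ' ' = 'B') := by
  rw [pvSpanEnd]
  split
  · exact pvSpanEnd_stop ts n (e + 1) (by rename_i h; omega)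
  · rename_i h
    by_cases hn : e < n
    · right
      refine ⟨hn, ?_⟩
      by_contra hc
      exact h ⟨hn, hc⟩
    · left; omega
termination_by n - e
decreasing_by omega

-- A's loop only ever appends to res
theorem pvLoopA_res (xs : List Char) (l : List (Int × Char))
    (res : List (List Char)) (tmp : List Char) :
    pvLoopA xs l res tmp =
      (res ++ (pvLoopA xs l [] tmp).1, (pvLoopA xs l [] tmp).2) := by
  induction l generalizing res tmp with
  | nil => simp [pvLoopA]
  | cons p rest ih =>
    obtain ⟨i, ch⟩ := p
    by_cases hB : ch = 'B'
    · simp only [pvLoopA, if_pos hB]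
      by_cases ht : tmp = []
      · simp only [ht, ne_eq, not_true_eq_false, if_false]
        exact ih _ _
      · simp only [if_pos ht, List.nil_append]
        rw [ih (res ++ [tmp]), ih [tmp]]
        simp [List.append_assoc]
    · by_cases hI : ch = 'I'
      · simp only [pvLoopA, if_neg hB, if_pos hI]
        exact ih _ _
      · simp only [pvLoopA, if_neg hB, if_neg hI]
        exact ih _ _

-- the value A finally returns (before String.ofList), started at suffix position s
def pvGA (xs ts : List Char) (s : Nat) (tmp : List Char) : List (List Char) :=
  let p := pvLoopA xs (PySem.List.enumerate (ts.drop s) (s : Int)) [] tmp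
  if p.2 ≠ [] then p.1 ++ [p.2] else p.1

def pvFlush (tmp : List Char) : List (List Char) := if tmp ≠ [] then [tmp] else []

theorem pvGA_end (xs ts : List Char) (tmp : List Char) :
    pvGA xs ts ts.length tmp = pvFlush tmp := by
  simp [pvGA, pvLoopA, pvFlush]

theorem pvGA_flush_step (xs ts : List Char) (s : Nat) (tmp : List Char)
    (hs : s < ts.length) (hB : ts.getD s ' ' = 'B') :
    pvGA xs ts s tmp = pvFlush tmp ++ pvGA xs ts (s + 1) [xs.getD s ' '] := by
  have hdrop := List.drop_eq_getElem_cons hs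
  have hgB : ts[s] = 'B' := by rw [← List.getD_eq_getElem ts ' ' hs]; exact hB
  simp only [pvGA, pvFlush, hdrop, PySem.List.enumerate_cons, hgB, pvLoopA,
    PySem.List.pyGet?_natCast, ← List.getD_eq_getElem?_getD]
  rw [pvLoopA_res]
  push_cast
  by_cases ht : tmp = []
  · simp [ht]
  · simp [ht]
    split <;> simp_all

theorem pvGA_nonB_step (xs ts : List Char) (s : Nat) (tmp : List Char)
    (hs : s < ts.length) (hB : ts.getD s ' ' ≠ 'B') :
    pvGA xs ts s tmp =
      pvGA xs ts (s + 1) (if ts.getD s ' ' = 'I' then tmp ++ [xs.getD s ' '] else tmp) := by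
  have hdrop := List.drop_eq_getElem_cons hs
  have hgB : ts[s] = ts.getD s ' ' := (List.getD_eq_getElem ts ' ' hs).symm
  simp only [pvGA, hdrop, PySem.List.enumerate_cons, hgB, pvLoopA, if_neg hB,
    PySem.List.pyGet?_natCast]
  by_cases hI : ts[s]?.getD ' ' = 'I' <;> push_cast <;>
    simp [hI, List.getD_eq_getElem?_getD]

theorem pvGA_span (xs ts : List Char) (s e : Nat) (tmp : List Char)
    (hse : s ≤ e) (hen : e ≤ ts.length)
    (hnb : ∀ j, s ≤ j → j < e → ts.getD j ' ' ≠ 'B') :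
    pvGA xs ts s tmp =
      pvGA xs ts e (tmp ++ ((List.range' s (e - s)).filter
        (fun j => ts.getD j ' ' = 'I')).map (fun j => xs.getD j ' ')) := by
  induction hk : e - s generalizing s tmp with
  | zero =>
    have : s = e := by omega
    subst this
    simp
  | succ k ih =>
    have hs_lt : s < e := by omega
    have hslen : s < ts.length := by omega
    rw [pvGA_nonB_step xs ts s tmp hslen (hnb s le_rfl hs_lt)]
    rw [ih (s + 1) _ (by omega) (fun j hj1 hj2 => hnb j (by omega) hj2) (by omega)]
    congr 1
    rw [List.range'_succ, List.filter_cons]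
    by_cases hI : ts[s]?.getD ' ' = 'I' <;>
      simp [hI, List.getD_eq_getElem?_getD, List.append_assoc]

theorem pvGA_main (xs ts : List Char) (s : Nat) (tmp : List Char)
    (hs : s < ts.length) (hB : ts.getD s ' ' = 'B') :
    pvGA xs ts s tmp = pvFlush tmp ++ pvLoopB xs ts ts.length s := by
  have hge := pvSpanEnd_ge ts ts.length (s + 1)
  have hle := pvSpanEnd_le ts ts.length (s + 1) (by omega)
  rw [pvGA_flush_step xs ts s tmp hs hB,
    pvGA_span xs ts (s + 1) (pvSpanEnd ts ts.length (s + 1)) _ hge hle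
      (pvSpanEnd_nonB ts ts.length (s + 1))]
  congr 1
  have hword : xs.getD s ' ' :: ((List.range' (s + 1) (pvSpanEnd ts ts.length (s + 1) - (s + 1))).filter
      (fun j => ts.getD j ' ' = 'I')).map (fun j => xs.getD j ' ')
      = pvWordB xs ts s (pvSpanEnd ts ts.length (s + 1)) := rfl
  rcases pvSpanEnd_stop ts ts.length (s + 1) (by omega) with hstop | ⟨hlt, hBe⟩
  · rw [hstop, pvGA_end]
    rw [pvLoopB, if_pos hs, pvLoopB]
    simp [hstop, pvFlush, pvWordB]
  · rw [pvGA_main xs ts (pvSpanEnd ts ts.length (s + 1)) _ hlt hBe]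
    conv_rhs => rw [pvLoopB]
    rw [if_pos hs]
    simp [pvFlush, ← hword]
termination_by ts.length - s
decreasing_by omega

-- ===== VERDICT (by name: the statement is the Claim_ definition above) =====
theorem cut_words_spec : Claim_equal_cut_words := by
  intro text tags _
  unfold Spec_cut_words cut_words cut_words_alt
  simp only [PySem.Str.len_eq, ne_eq]
  by_cases h1 : (text.toList.length : Int) < 1
  · rw [if_pos (by tauto), if_pos (by tauto)]
  by_cases h2 : (tags.toList.length : Int) < 1
  · rw [if_pos (by tauto), if_pos (by tauto)]
  by_cases h3 : (text.toList.length : Int) = (tags.toList.length : Int)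
  case neg =>
    have h3' : ¬ (tags.toList.length : Int) = (text.toList.length : Int) := fun h => h3 h.symm
    rw [if_pos (by tauto), if_pos (by tauto)]
  by_cases h4 : PySem.Str.pyGet? tags 0 = some 'B'
  case neg => rw [if_pos (by tauto), if_pos (by tauto)]
  have h3'' : (tags.toList.length : Int) = (text.toList.length : Int) := h3.symm
  have hga : ¬((text.toList.length : Int) < 1 ∨ (tags.toList.length : Int) < 1 ∨
      ¬(text.toList.length : Int) = (tags.toList.length : Int) ∨
      ¬PySem.Str.pyGet? tags 0 = some 'B') := by tauto
  have hgb : ¬((text.toList.length : Int) < 1 ∨ (tags.toList.length : Int) < 1 ∨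
      ¬(tags.toList.length : Int) = (text.toList.length : Int) ∨
      ¬PySem.Str.pyGet? tags 0 = some 'B') := by tauto
  rw [if_neg hga, if_neg hgb]
  have hlen : 0 < tags.toList.length := by omega
  have hB0 : tags.toList.getD 0 ' ' = 'B' := by
    have h4' := h4
    rw [show (0 : Int) = ((0 : Nat) : Int) by simp, PySem.Str.pyGet?_natCast] at h4'
    rw [List.getD_eq_getElem?_getD, h4']
    rfl
  have h0 : pvGA text.toList tags.toList 0 [] =
      pvLoopB text.toList tags.toList tags.toList.length 0 := by
    rw [pvGA_main _ _ 0 [] hlen hB0]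
    simp [pvFlush]
  simp only [pvGA, List.drop_zero, Nat.cast_zero, ne_eq] at h0
  have hlenN : text.toList.length = tags.toList.length := by omega
  rw [hlenN, ← h0]
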